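-- pv_equiv track=rewrite | github.com/johngaitho05/Interview-Questions | PerfectShuffle.py | shuffleIsPerfect
-- ===== SOURCE A (Python) =====
-- def shuffleIsPerfect(list1,list2,list3):
--     checker1 = [list3.index(element) for element in list1]
--     checker2 = [list3.index(element) for element in list2]
--
--     ''' if values in checker1 and checker2 are sorted are sorted, it means list3 is
--      dictionary perfect shuffle of list1 and list2 '''
--     if all(checker1[i] <= checker1[i + 1] for i in  range(len(checker2) - 1)):
--         return True
--
--     if all(checker2[i] <= checker2[i + 1] for i in range(len(checker2) - 1)):
--         return True
--
--     return False
-- ===== SOURCE B (Python) =====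
-- def shuffleIsPerfect(list1, list2, list3):
--     # Order is preserved in list3 iff the consecutively-deduplicated list is a
--     # subsequence of list3's distinct elements in first-occurrence order; this is
--     # checked by a streaming two-pointer scan that never computes index positions.
--     order = list(dict.fromkeys(list3))
--     members = set(order)
--
--     def preserved(lst):
--         it = iter(order)
--         prev = None
--         for x in lst:
--             if x == prev:
--                 continue
--             prev = x
--             for y in it:
--                 if y == x:
--                     break
--             else:
--                 # the scan stalled: either x occurs nowhere in list3 (fail loudly,
--                 # as list.index's contract requires) or x was already passed
--                 if x not in members:
--                     raise ValueError(f"{x} is not in list")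
--                 return False
--         return True
--
--     return preserved(list1) or preserved(list2)
-- ===== Notes on version B (the rewrite author's own statement) =====
-- stated objective: faster
-- what changed: B never computes position lists or tests sortedness: it deduplicates list3 to its distinct elements in first-occurrence order and verifies each list by a streaming two-pointer subsequence scan (skipping consecutive duplicates) that consumes that order once, instead of A's repeated list3.index calls plus range-indexed sortedness checks; B also checks list1 in full where A accidentally truncates the check.
-- intended difference: When len(list2) < len(list1) and only the first len(list2) positions of list1 in list3 are ascending while the full position list of list1 and that of list2 are not, A returns True because its sortedness scan of checker1 is truncated to range(len(list2)-1); B returns False, the intended answer since neither list's order is preserved in list3. — e.g. on shuffleIsPerfect([0, 2, 1], [4, 3], [0, 1, 2, 3, 4]): A returns true, B returns false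
import Mathlib
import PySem

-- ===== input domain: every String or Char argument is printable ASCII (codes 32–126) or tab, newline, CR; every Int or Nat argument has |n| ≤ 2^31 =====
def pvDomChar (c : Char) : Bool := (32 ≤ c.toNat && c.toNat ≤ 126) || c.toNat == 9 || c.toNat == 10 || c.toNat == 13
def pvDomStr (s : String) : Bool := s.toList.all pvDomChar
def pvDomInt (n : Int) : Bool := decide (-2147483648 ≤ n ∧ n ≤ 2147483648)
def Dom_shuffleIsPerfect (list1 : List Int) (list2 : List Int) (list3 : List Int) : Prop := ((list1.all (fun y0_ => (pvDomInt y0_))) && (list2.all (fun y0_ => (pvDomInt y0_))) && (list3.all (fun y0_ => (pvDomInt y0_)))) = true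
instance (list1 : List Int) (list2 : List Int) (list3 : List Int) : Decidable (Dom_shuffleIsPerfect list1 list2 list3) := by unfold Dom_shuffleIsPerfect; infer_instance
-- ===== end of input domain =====

-- B replaces A's position lists and sortedness scans by a streaming two-pointer
-- subsequence check of each list (consecutive duplicates skipped) against list3's
-- distinct elements in first-occurrence order; B checks list1 in full where A
-- truncates the check (the stated intended difference D_).

-- ===== PORT A =====
def shuffleIsPerfect (list1 : List Int) (list2 : List Int) (list3 : List Int) : Bool :=
  let checker1 := list1.map (fun e => (((PySem.List.index? list3 e).getD 0 : Nat) : Int))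
  let checker2 := list2.map (fun e => (((PySem.List.index? list3 e).getD 0 : Nat) : Int))
  if (PySem.List.pyRange 0 ((checker2.length : Int) - 1) 1).all
      (fun i => decide (PySem.List.pyGetD checker1 i 0 ≤ PySem.List.pyGetD checker1 (i + 1) 0)) then
    true
  else if (PySem.List.pyRange 0 ((checker2.length : Int) - 1) 1).all
      (fun i => decide (PySem.List.pyGetD checker2 i 0 ≤ PySem.List.pyGetD checker2 (i + 1) 0)) then
    true
  else
    false

-- ===== PORT B =====
-- the inner 'for y in it: if y == x: break / else: return False' of preserved():
-- advance the iterator past the first occurrence of x (none = iterator exhausted)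
def pvSkipTo (x : Int) : List Int → Option (List Int)
  | [] => none
  | y :: ys => if y = x then some ys else pvSkipTo x ys

-- the 'for x in lst' loop of preserved(), with prev and the iterator's remaining
-- elements as explicit state; on a stall Source B raises ValueError when x occurs
-- nowhere in list3 ('x not in members') — those inputs lie outside Pre_ — and
-- returns False otherwise, so the none branch here is False
def pvPreservedAux : List Int → Option Int → List Int → Bool
  | [], _, _ => true
  | x :: xs, prev, it =>
    if prev = some x then pvPreservedAux xs prev it
    else
      match pvSkipTo x it with
      | none => false
      | some it' => pvPreservedAux xs (some x) it'

def pvPreserved (lst order : List Int) : Bool := pvPreservedAux lst none order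

def shuffleIsPerfect_alt (list1 : List Int) (list2 : List Int) (list3 : List Int) : Bool :=
  let order := PySem.List.dedup list3   -- list(dict.fromkeys(list3))
  pvPreserved list1 order || pvPreserved list2 order

-- ===== PRECONDITION & SPEC =====
-- the consecutive elements of l occur at non-decreasing (first-occurrence) positions in list3
def pvAscIn (list3 l : List Int) : Prop :=
  l.IsChain (fun a b => list3.idxOf a ≤ list3.idxOf b)

-- Pre_ excludes exactly the inputs on which A raises: ValueError when an element of list1/list2
-- is missing from list3, and IndexError when list2 is longer than list1 (and has ≥ 2 elements)
-- while list1's position list is ascending, so A's first scan runs past the end of checker1.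
def Pre_shuffleIsPerfect (list1 : List Int) (list2 : List Int) (list3 : List Int) : Prop :=
  (∀ x ∈ list1, x ∈ list3) ∧ (∀ x ∈ list2, x ∈ list3) ∧
    (list1.length < list2.length → 2 ≤ list2.length → ¬ pvAscIn list3 list1)
instance (list1 : List Int) (list2 : List Int) (list3 : List Int) : Decidable (Pre_shuffleIsPerfect list1 list2 list3) := by
  unfold Pre_shuffleIsPerfect pvAscIn; infer_instance

def pvWitness_shuffleIsPerfect : List Int × List Int × List Int := ([0, 1], [2, 3], [0, 1, 2, 3])

-- A truncates the sortedness check of list1's positions to len(list2)-1 comparisons; when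
-- len(list2) < len(list1) and only that checked prefix is ascending (the full position list of
-- list1 is not, nor is list2's), A returns True although neither list's order is preserved in
-- list3; B returns False, the intended answer.
def D_shuffleIsPerfect (list1 : List Int) (list2 : List Int) (list3 : List Int) : Prop :=
  list2.length < list1.length ∧
    pvAscIn list3 (list1.take list2.length) ∧
    ¬ pvAscIn list3 list1 ∧
    ¬ pvAscIn list3 list2
instance (list1 : List Int) (list2 : List Int) (list3 : List Int) : Decidable (D_shuffleIsPerfect list1 list2 list3) := by
  unfold D_shuffleIsPerfect pvAscIn; infer_instance

def Spec_shuffleIsPerfect (list1 : List Int) (list2 : List Int) (list3 : List Int) (out : Bool) : Prop :=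
  ¬ D_shuffleIsPerfect list1 list2 list3 → out = shuffleIsPerfect_alt list1 list2 list3
instance (list1 : List Int) (list2 : List Int) (list3 : List Int) (out : Bool) : Decidable (Spec_shuffleIsPerfect list1 list2 list3 out) := by
  unfold Spec_shuffleIsPerfect; infer_instance

def pvDiffWitness_shuffleIsPerfect : List Int × List Int × List Int := ([0, 2, 1], [4, 3], [0, 1, 2, 3, 4])
def pvDiffWitnessOut_shuffleIsPerfect : Bool × Bool := (true, false)

-- ===== CLAIM (what is proved, stated in full; the proofs are below) =====
def Claim_unchanged_shuffleIsPerfect : Prop := ∀ (list1 : List Int) (list2 : List Int) (list3 : List Int), Dom_shuffleIsPerfect list1 list2 list3 → Pre_shuffleIsPerfect list1 list2 list3 → Spec_shuffleIsPerfect list1 list2 list3 (shuffleIsPerfect list1 list2 list3)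
def Claim_changed_shuffleIsPerfect : Prop := Dom_shuffleIsPerfect (pvDiffWitness_shuffleIsPerfect.1) (pvDiffWitness_shuffleIsPerfect.2.1) (pvDiffWitness_shuffleIsPerfect.2.2) ∧ Pre_shuffleIsPerfect (pvDiffWitness_shuffleIsPerfect.1) (pvDiffWitness_shuffleIsPerfect.2.1) (pvDiffWitness_shuffleIsPerfect.2.2) ∧ D_shuffleIsPerfect (pvDiffWitness_shuffleIsPerfect.1) (pvDiffWitness_shuffleIsPerfect.2.1) (pvDiffWitness_shuffleIsPerfect.2.2) ∧ shuffleIsPerfect (pvDiffWitness_shuffleIsPerfect.1) (pvDiffWitness_shuffleIsPerfect.2.1) (pvDiffWitness_shuffleIsPerfect.2.2) = pvDiffWitnessOut_shuffleIsPerfect.1 ∧ shuffleIsPerfect_alt (pvDiffWitness_shuffleIsPerfect.1) (pvDiffWitness_shuffleIsPerfect.2.1) (pvDiffWitness_shuffleIsPerfect.2.2) = pvDiffWitnessOut_shuffleIsPerfect.2 ∧ pvDiffWitnessOut_shuffleIsPerfect.1 ≠ pvDiffWitnessOut_shuffleIsPerfect.2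
def Claim_exact_shuffleIsPerfect : Prop := ∀ (list1 : List Int) (list2 : List Int) (list3 : List Int), Dom_shuffleIsPerfect list1 list2 list3 → Pre_shuffleIsPerfect list1 list2 list3 → D_shuffleIsPerfect list1 list2 list3 → shuffleIsPerfect list1 list2 list3 ≠ shuffleIsPerfect_alt list1 list2 list3

-- ===== LEMMAS AND PROOFS =====

-- proof-side reformulations of both ports' checks
def pvSortedLe (c : List Int) : Bool :=
  decide (∀ k, k < c.length - 1 → c.getD k 0 ≤ c.getD (k + 1) 0)
def pvPosList (list3 l : List Int) : List Int := l.map (fun x => ((list3.idxOf x : Nat) : Int))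

-- the closed-form condition of Pre_/D_ matches A's boolean check
lemma pv_ascIn_iff (list3 l : List Int) :
    pvAscIn list3 l ↔ pvSortedLe (pvPosList list3 l) = true := by
  unfold pvAscIn pvSortedLe pvPosList
  rw [decide_eq_true_eq, List.isChain_iff_getElem]
  constructor
  · intro h k hk
    simp only [List.length_map] at hk
    have hk' : k + 1 < l.length := by omega
    rw [List.getD_eq_getElem _ _ (by simp; omega), List.getD_eq_getElem _ _ (by simp; omega),
      List.getElem_map, List.getElem_map]
    exact_mod_cast h k hk'
  · intro h k hk
    have := h k (by simp only [List.length_map]; omega)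
    rw [List.getD_eq_getElem _ _ (by simp; omega), List.getD_eq_getElem _ _ (by simp; omega),
      List.getElem_map, List.getElem_map] at this
    exact_mod_cast this

lemma pv_posList_take (list3 l : List Int) (n : Nat) :
    (pvPosList list3 l).take n = pvPosList list3 (l.take n) := by
  simp [pvPosList, List.map_take]

-- first-occurrence index: idxOf? agrees with idxOf on members
lemma pv_idxOf?_eq (l : List Int) (x : Int) (h : x ∈ l) : l.idxOf? x = some (l.idxOf x) := by
  cases hq : l.idxOf? x with
  | none =>
    rw [← PySem.List.index?_eq_idxOf?, PySem.List.index?_eq_none_iff] at hq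
    exact absurd h hq
  | some k => rw [List.idxOf_eq_getD_idxOf?, hq]; rfl

-- A's mapped index values are pvPosList, on members
lemma pv_checker_eq (list3 l : List Int) (h : ∀ x ∈ l, x ∈ list3) :
    l.map (fun e => (((PySem.List.index? list3 e).getD 0 : Nat) : Int)) = pvPosList list3 l := by
  unfold pvPosList
  refine List.map_congr_left (fun e he => ?_)
  rw [PySem.List.index?_eq_idxOf?, pv_idxOf?_eq list3 e (h e he)]
  rfl

-- ---------- B-side: the two-pointer scan decides the ascending-positions chain ----------

-- first-occurrence dedup, in a structurally recursive form
def pvFO : List Int → List Int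
  | [] => []
  | v :: rest => v :: (pvFO rest).filter (fun x => x ≠ v)

lemma pv_foldl_add_eq (l s : List Int) :
    l.foldl PySem.Set.add s = s ++ (pvFO l).filter (fun x => ¬ s.contains x) := by
  induction l generalizing s with
  | nil => simp [pvFO]
  | cons v rest ih =>
    simp only [List.foldl_cons, pvFO]
    rw [ih]
    by_cases hv : v ∈ s
    · have hadd : PySem.Set.add s v = s := by
        simp [PySem.Set.add, PySem.Set.contains, hv]
      rw [hadd]
      have hvc : s.contains v = true := by simpa using hv
      simp only [List.filter_cons, hvc]
      rw [List.filter_filter]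
      congr 1
      refine List.filter_congr (fun x _ => ?_)
      by_cases hxv : x = v
      · subst hxv; simp [hv]
      · simp [hxv]
    · have hadd : PySem.Set.add s v = s ++ [v] := by
        simp [PySem.Set.add, PySem.Set.contains, hv]
      have hvc : s.contains v = false := by simpa using hv
      rw [hadd, List.append_assoc, List.singleton_append]
      congr 1
      rw [List.filter_cons, if_pos (by simpa using hv), List.filter_filter]
      congr 1
      refine List.filter_congr (fun x _ => ?_)
      by_cases hxv : x = v
      · subst hxv; simp
      · simp [hxv]

lemma pv_dedup_eq_pvFO (l : List Int) : PySem.List.dedup l = pvFO l := by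
  rw [PySem.List.dedup_eq_ofList, PySem.Set.ofList_eq_foldl, pv_foldl_add_eq]
  simp

lemma pv_mem_pvFO (l : List Int) (x : Int) : x ∈ pvFO l ↔ x ∈ l := by
  induction l with
  | nil => simp [pvFO]
  | cons v rest ih =>
    simp only [pvFO, List.mem_cons, List.mem_filter, ih]
    by_cases hxv : x = v
    · simp [hxv]
    · simp [hxv]

lemma pv_nodup_pvFO (l : List Int) : (pvFO l).Nodup := by
  induction l with
  | nil => simp [pvFO]
  | cons v rest ih =>
    rw [pvFO, List.nodup_cons]
    refine ⟨fun hm => ?_, ih.filter _⟩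
    have := (List.mem_filter.mp hm).2
    simp at this

-- filtering preserves the relative order of first occurrences
lemma pv_filter_idxOf_mono (p : Int → Bool) (L : List Int) (a b : Int)
    (ha : a ∈ L) (hb : b ∈ L) (hpa : p a = true) (hpb : p b = true) :
    ((L.filter p).idxOf a ≤ (L.filter p).idxOf b ↔ L.idxOf a ≤ L.idxOf b) := by
  induction L with
  | nil => cases ha
  | cons h t ih =>
    by_cases hph : p h = true
    · rw [List.filter_cons_of_pos hph]
      by_cases hha : h = a
      · subst hha
        simp [List.idxOf_cons_self]
      · by_cases hhb : h = b
        · subst hhb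
          rw [List.idxOf_cons_self, List.idxOf_cons_self,
            List.idxOf_cons_ne _ (by simpa using hha), List.idxOf_cons_ne _ (by simpa using hha)]
          omega
        · have ha' : a ∈ t := by
            rcases List.mem_cons.mp ha with h1 | h1
            · exact absurd h1.symm hha
            · exact h1
          have hb' : b ∈ t := by
            rcases List.mem_cons.mp hb with h1 | h1
            · exact absurd h1.symm hhb
            · exact h1
          rw [List.idxOf_cons_ne _ (by simpa using hha), List.idxOf_cons_ne _ (by simpa using hhb),
            List.idxOf_cons_ne _ (by simpa using hha), List.idxOf_cons_ne _ (by simpa using hhb)]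
          have := ih ha' hb'
          omega
    · have hha : h ≠ a := fun h1 => hph (h1 ▸ hpa)
      have hhb : h ≠ b := fun h1 => hph (h1 ▸ hpb)
      have ha' : a ∈ t := by
        rcases List.mem_cons.mp ha with h1 | h1
        · exact absurd h1.symm hha
        · exact h1
      have hb' : b ∈ t := by
        rcases List.mem_cons.mp hb with h1 | h1
        · exact absurd h1.symm hhb
        · exact h1
      rw [List.filter_cons_of_neg (by simp [hph]),
        List.idxOf_cons_ne _ (by simpa using hha), List.idxOf_cons_ne _ (by simpa using hhb)]
      have := ih ha' hb'
      omega

-- pvFO preserves the relative order of first occurrences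
lemma pv_pvFO_idxOf_mono (l : List Int) (a b : Int) (ha : a ∈ l) (hb : b ∈ l) :
    ((pvFO l).idxOf a ≤ (pvFO l).idxOf b ↔ l.idxOf a ≤ l.idxOf b) := by
  induction l with
  | nil => cases ha
  | cons v rest ih =>
    simp only [pvFO]
    by_cases hva : v = a
    · subst hva
      simp [List.idxOf_cons_self]
    · by_cases hvb : v = b
      · subst hvb
        rw [List.idxOf_cons_self, List.idxOf_cons_self,
          List.idxOf_cons_ne _ (by simpa using hva), List.idxOf_cons_ne _ (by simpa using hva)]
        omega
      · have ha' : a ∈ rest := by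
          rcases List.mem_cons.mp ha with h1 | h1
          · exact absurd h1.symm hva
          · exact h1
        have hb' : b ∈ rest := by
          rcases List.mem_cons.mp hb with h1 | h1
          · exact absurd h1.symm hvb
          · exact h1
        rw [List.idxOf_cons_ne _ (by simpa using hva), List.idxOf_cons_ne _ (by simpa using hvb),
          List.idxOf_cons_ne _ (by simpa using hva), List.idxOf_cons_ne _ (by simpa using hvb)]
        have hmem_a : a ∈ pvFO rest := (pv_mem_pvFO rest a).mpr ha'
        have hmem_b : b ∈ pvFO rest := (pv_mem_pvFO rest b).mpr hb'
        have h1 := pv_filter_idxOf_mono (fun x => x ≠ v) (pvFO rest) a b hmem_a hmem_b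
          (by simpa using fun h : a = v => hva h.symm)
          (by simpa using fun h : b = v => hvb h.symm)
        have h2 := ih ha' hb'
        omega

-- skipping to x drops everything up to and including x's first occurrence
lemma pv_skipTo_of_not_mem (x : Int) (L : List Int) (hx : x ∉ L) : pvSkipTo x L = none := by
  induction L with
  | nil => rfl
  | cons y ys ih =>
    have hyx : ¬ y = x := fun h => hx (h ▸ List.mem_cons_self)
    rw [pvSkipTo, if_neg hyx]
    exact ih (fun h => hx (List.mem_cons_of_mem _ h))

lemma pv_skipTo_of_mem (x : Int) (L : List Int) (hx : x ∈ L) :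
    pvSkipTo x L = some (L.drop (L.idxOf x + 1)) := by
  induction L with
  | nil => cases hx
  | cons y ys ih =>
    by_cases hyx : y = x
    · subst hyx
      rw [pvSkipTo, if_pos rfl, List.idxOf_cons_self]
      rfl
    · have hx' : x ∈ ys := by
        rcases List.mem_cons.mp hx with h1 | h1
        · exact absurd h1.symm hyx
        · exact h1
      rw [pvSkipTo, if_neg hyx, ih hx', List.idxOf_cons_ne _ (by simpa using hyx)]
      rfl

-- skipping to x inside the suffix starting after position k, on a nodup list
lemma pv_skipTo_drop (L : List Int) (hnd : L.Nodup) (x : Int) (hx : x ∈ L) (k : Nat) :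
    pvSkipTo x (L.drop k) =
      if k ≤ L.idxOf x then some (L.drop (L.idxOf x + 1)) else none := by
  induction L generalizing k with
  | nil => cases hx
  | cons h t ih =>
    cases k with
    | zero =>
      rw [List.drop_zero, pv_skipTo_of_mem x _ hx, if_pos (Nat.zero_le _)]
    | succ k =>
      rw [List.drop_succ_cons]
      by_cases hhx : h = x
      · subst hhx
        have hnt : h ∉ t := (List.nodup_cons.mp hnd).1
        rw [List.idxOf_cons_self, if_neg (by omega)]
        exact pv_skipTo_of_not_mem h _ (fun hm => hnt (List.mem_of_mem_drop hm))
      · have hx' : x ∈ t := by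
          rcases List.mem_cons.mp hx with h1 | h1
          · exact absurd h1.symm hhx
          · exact h1
        rw [ih (List.nodup_cons.mp hnd).2 hx' k, List.idxOf_cons_ne _ (by simpa using hhx)]
        by_cases hk : k ≤ t.idxOf x
        · rw [if_pos hk, if_pos (by omega)]
          rfl
        · rw [if_neg hk, if_neg (by omega)]

-- idxOf is injective on a nodup list
lemma pv_idxOf_inj (L : List Int) (_hnd : L.Nodup) (a b : Int) (ha : a ∈ L) (_hb : b ∈ L)
    (h : L.idxOf a = L.idxOf b) : a = b := by
  have hla : L.idxOf a < L.length := List.idxOf_lt_length_of_mem ha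
  have hgb : L[L.idxOf b]'(h ▸ hla) = b := List.getElem_idxOf (h ▸ hla)
  have hga : L[L.idxOf a]'hla = a := List.getElem_idxOf hla
  rw [← hga, ← hgb]
  exact getElem_congr_idx h

-- the streaming scan, started after p's position, decides the chain from p on
lemma pv_presAux_iff (order : List Int) (hnd : order.Nodup) (l : List Int)
    (hl : ∀ x ∈ l, x ∈ order) (p : Int) (hp : p ∈ order) :
    (pvPreservedAux l (some p) (order.drop (order.idxOf p + 1)) = true ↔
      List.IsChain (fun a b => order.idxOf a ≤ order.idxOf b) (p :: l)) := by
  induction l generalizing p with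
  | nil => simp [pvPreservedAux]
  | cons x xs ih =>
    have hx : x ∈ order := hl x List.mem_cons_self
    have hl' : ∀ y ∈ xs, y ∈ order := fun y hy => hl y (List.mem_cons_of_mem _ hy)
    rw [List.isChain_cons_cons]
    by_cases hpx : p = x
    · subst hpx
      rw [pvPreservedAux, if_pos rfl, ih hl' p hp]
      simp
    · rw [pvPreservedAux, if_neg (by simpa using fun h : some p = some x => hpx (by injection h)),
        pv_skipTo_drop order hnd x hx (order.idxOf p + 1)]
      by_cases hle : order.idxOf p + 1 ≤ order.idxOf x
      · rw [if_pos hle, ih hl' x hx]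
        have : order.idxOf p ≤ order.idxOf x := by omega
        simp [this]
      · rw [if_neg hle]
        have hne : order.idxOf p ≠ order.idxOf x := fun h =>
          hpx (pv_idxOf_inj order hnd p x hp hx h)
        have : ¬ order.idxOf p ≤ order.idxOf x := by omega
        simp [this]

lemma pv_preserved_iff (order : List Int) (hnd : order.Nodup) (l : List Int)
    (hl : ∀ x ∈ l, x ∈ order) :
    (pvPreserved l order = true ↔
      List.IsChain (fun a b => order.idxOf a ≤ order.idxOf b) l) := by
  cases l with
  | nil => simp [pvPreserved, pvPreservedAux]
  | cons x xs =>
    have hx : x ∈ order := hl x List.mem_cons_self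
    have hl' : ∀ y ∈ xs, y ∈ order := fun y hy => hl y (List.mem_cons_of_mem _ hy)
    rw [pvPreserved, pvPreservedAux, if_neg (by simp), pv_skipTo_of_mem x order hx]
    exact pv_presAux_iff order hnd xs hl' x hx

-- B's per-list scan computes A's ascending-positions check
lemma pv_pres_eq (list3 l : List Int) (h : ∀ x ∈ l, x ∈ list3) :
    pvPreserved l (PySem.List.dedup list3) = pvSortedLe (pvPosList list3 l) := by
  rw [Bool.eq_iff_iff, pv_dedup_eq_pvFO,
    pv_preserved_iff (pvFO list3) (pv_nodup_pvFO list3) l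
      (fun x hx => (pv_mem_pvFO list3 x).mpr (h x hx)),
    ← pv_ascIn_iff]
  unfold pvAscIn
  rw [List.isChain_iff_getElem, List.isChain_iff_getElem]
  constructor
  · intro hc i hi
    have h1 : l[i] ∈ l := List.getElem_mem _
    have h2 : l[i + 1] ∈ l := List.getElem_mem _
    exact (pv_pvFO_idxOf_mono list3 l[i] l[i+1] (h _ h1) (h _ h2)).mp (hc i hi)
  · intro hc i hi
    have h1 : l[i] ∈ l := List.getElem_mem _
    have h2 : l[i + 1] ∈ l := List.getElem_mem _
    exact (pv_pvFO_idxOf_mono list3 l[i] l[i+1] (h _ h1) (h _ h2)).mpr (hc i hi)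

-- getD on a take agrees with getD on the list
lemma pv_getD_take_eq (c : List Int) (n k : Nat) (hk : k < n) (hn : n ≤ c.length) :
    (c.take n).getD k 0 = c.getD k 0 := by
  rw [List.getD_eq_getElem _ _ (by simp only [List.length_take]; omega),
    List.getD_eq_getElem _ _ (by omega), List.getElem_take]

-- A's range-based check on the first n elements decides pvSortedLe of the take
lemma pv_rangeAll_eq (c : List Int) (n : Nat) (h : n ≤ c.length) :
    ((PySem.List.pyRange 0 ((n : Int) - 1) 1).all
      (fun i => decide (PySem.List.pyGetD c i 0 ≤ PySem.List.pyGetD c (i + 1) 0)))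
    = pvSortedLe (c.take n) := by
  unfold pvSortedLe
  rw [Bool.eq_iff_iff]
  simp only [List.all_eq_true, decide_eq_true_eq]
  have hlen : (c.take n).length = n := by simp only [List.length_take]; omega
  constructor
  · intro hall k hk
    rw [hlen] at hk
    have hmem : (k : Int) ∈ PySem.List.pyRange 0 ((n : Int) - 1) 1 :=
      PySem.List.mem_pyRange_one.mpr ⟨by positivity, by omega⟩
    have := hall _ hmem
    have hc : ((k : Int) + 1) = (((k + 1 : Nat)) : Int) := by push_cast; ring
    rw [PySem.List.pyGetD_natCast, hc, PySem.List.pyGetD_natCast] at this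
    rw [pv_getD_take_eq c n k (by omega) h, pv_getD_take_eq c n (k + 1) (by omega) h]
    exact this
  · intro hs i hi
    rw [PySem.List.mem_pyRange_one] at hi
    obtain ⟨h0, h1⟩ := hi
    obtain ⟨k, rfl⟩ := Int.eq_ofNat_of_zero_le h0
    have hc : ((k : Int) + 1) = (((k + 1 : Nat)) : Int) := by push_cast; ring
    rw [PySem.List.pyGetD_natCast, hc, PySem.List.pyGetD_natCast]
    have := hs k (by rw [hlen]; omega)
    rwa [pv_getD_take_eq c n k (by omega) h, pv_getD_take_eq c n (k + 1) (by omega) h] at this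

-- a violation below the range bound forces A's check to false
lemma pv_rangeAll_false (c : List Int) (m : Int) (k : Nat) (_hk : k + 1 < c.length)
    (hkm : (k : Int) < m) (hv : ¬ c.getD k 0 ≤ c.getD (k + 1) 0) :
    ((PySem.List.pyRange 0 m 1).all
      (fun i => decide (PySem.List.pyGetD c i 0 ≤ PySem.List.pyGetD c (i + 1) 0))) = false := by
  rw [List.all_eq_false]
  refine ⟨(k : Int), PySem.List.mem_pyRange_one.mpr ⟨by positivity, hkm⟩, ?_⟩
  have hc : ((k : Int) + 1) = (((k + 1 : Nat)) : Int) := by push_cast; ring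
  rw [PySem.List.pyGetD_natCast, hc, PySem.List.pyGetD_natCast]
  simpa using hv

-- prefixes of ascending lists are ascending
lemma pv_sortedLe_take (c : List Int) (n : Nat) (h : pvSortedLe c = true) :
    pvSortedLe (c.take n) = true := by
  unfold pvSortedLe at *
  rw [decide_eq_true_eq] at *
  intro k hk
  simp only [List.length_take] at hk
  have hk1 : k + 1 < min n c.length := by omega
  have h1 : k < c.length - 1 := by omega
  have := h k h1
  rw [List.getD_eq_getElem _ _ (by simp; omega), List.getD_eq_getElem _ _ (by simp; omega),
    List.getElem_take, List.getElem_take]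
  rw [List.getD_eq_getElem _ _ (by omega), List.getD_eq_getElem _ _ (by omega)] at this
  exact this

-- the empty list is ascending
lemma pv_sortedLe_nil : pvSortedLe [] = true := by decide

-- the two ports, rewritten to the common pvPosList/pvSortedLe form
lemma pv_A_eq (list1 list2 list3 : List Int) (h1 : ∀ x ∈ list1, x ∈ list3)
    (h2 : ∀ x ∈ list2, x ∈ list3) :
    shuffleIsPerfect list1 list2 list3 =
      (if (PySem.List.pyRange 0 ((list2.length : Int) - 1) 1).all
          (fun i => decide (PySem.List.pyGetD (pvPosList list3 list1) i 0 ≤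
            PySem.List.pyGetD (pvPosList list3 list1) (i + 1) 0)) then true
       else if pvSortedLe (pvPosList list3 list2) then true else false) := by
  unfold shuffleIsPerfect
  simp only [pv_checker_eq list3 list1 h1, pv_checker_eq list3 list2 h2]
  have hl2 : (pvPosList list3 list2).length = list2.length := by simp [pvPosList]
  rw [hl2, pv_rangeAll_eq (pvPosList list3 list2) list2.length (by rw [hl2]),
    List.take_of_length_le (by rw [hl2])]

lemma pv_B_eq (list1 list2 list3 : List Int) (h1 : ∀ x ∈ list1, x ∈ list3)
    (h2 : ∀ x ∈ list2, x ∈ list3) :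
    shuffleIsPerfect_alt list1 list2 list3 =
      (pvSortedLe (pvPosList list3 list1) || pvSortedLe (pvPosList list3 list2)) := by
  show (pvPreserved list1 (PySem.List.dedup list3) || pvPreserved list2 (PySem.List.dedup list3)) = _
  rw [pv_pres_eq list3 list1 h1, pv_pres_eq list3 list2 h2]

-- ===== VERDICT (by name: the statement is the Claim_ definition above) =====
theorem shuffleIsPerfect_spec : Claim_unchanged_shuffleIsPerfect := by
  intro list1 list2 list3 _ hpre hnd
  obtain ⟨h1, h2, h3⟩ := hpre
  rw [pv_A_eq list1 list2 list3 h1 h2, pv_B_eq list1 list2 list3 h1 h2]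
  set p1 := pvPosList list3 list1 with hp1
  set p2 := pvPosList list3 list2 with hp2
  have hl1 : p1.length = list1.length := by simp [hp1, pvPosList]
  by_cases hle : list2.length ≤ list1.length
  · rw [pv_rangeAll_eq p1 list2.length (by omega)]
    cases hS2 : pvSortedLe p2
    · cases hS1 : pvSortedLe p1
      · have hnt : pvSortedLe (p1.take list2.length) = false := by
          cases hT : pvSortedLe (p1.take list2.length)
          · rfl
          · rcases Nat.lt_or_ge list2.length list1.length with hlt | hge
            · refine absurd ⟨hlt, ?_, ?_, ?_⟩ hnd
              · rw [pv_ascIn_iff, ← pv_posList_take]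
                exact hT
              · rw [pv_ascIn_iff]
                simp [← hp1, hS1]
              · rw [pv_ascIn_iff]
                simp [← hp2, hS2]
            · have heq : list2.length = list1.length := by omega
              rw [heq, ← hl1, List.take_length] at hT
              rw [hT] at hS1
              exact absurd hS1 (by simp)
        simp [hnt]
      · have := pv_sortedLe_take p1 list2.length hS1
        simp [this]
    · cases hS1 : pvSortedLe p1 <;> simp
  · -- list1 shorter than list2: A's first scan; Pre_ says p1 is not ascending unless the scan is empty
    by_cases h2len : 2 ≤ list2.length
    · have hS1 : pvSortedLe p1 = false := by
        have := h3 (by omega) h2len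
        rw [pv_ascIn_iff, ← hp1] at this
        simpa using this
      have hex : ∃ k, k < p1.length - 1 ∧ ¬ p1.getD k 0 ≤ p1.getD (k + 1) 0 := by
        by_contra hc
        push Not at hc
        have : pvSortedLe p1 = true := by
          unfold pvSortedLe
          rw [decide_eq_true_eq]
          exact fun k hk => hc k hk
        rw [this] at hS1
        exact absurd hS1 (by simp)
      obtain ⟨k, hk, hv⟩ := hex
      rw [pv_rangeAll_false p1 ((list2.length : Int) - 1) k (by omega) (by omega) hv]
      cases hS2 : pvSortedLe p2 <;> simp [hS1]
    · -- list2.length ≤ 1 and list1.length < list2.length: list1 = [], the scanned range is empty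
      have hl10 : list1.length = 0 := by omega
      have hp1nil : p1 = [] := by
        rw [hp1]
        cases list1 with
        | nil => rfl
        | cons a t => simp at hl10
      have hr : ((list2.length : Int) - 1) ≤ 0 := by omega
      have hrange : PySem.List.pyRange 0 ((list2.length : Int) - 1) 1 = [] := by
        simp [PySem.List.pyRange]
        omega
      rw [hrange]
      simp [hp1nil, pv_sortedLe_nil]

theorem shuffleIsPerfect_changed : Claim_changed_shuffleIsPerfect := by
  unfold Claim_changed_shuffleIsPerfect; decide

theorem shuffleIsPerfect_tight : Claim_exact_shuffleIsPerfect := by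
  intro list1 list2 list3 _ hpre hd
  obtain ⟨h1, h2, _⟩ := hpre
  obtain ⟨hlt, hT, hS1, hS2⟩ := hd
  rw [pv_ascIn_iff, ← pv_posList_take] at hT
  rw [pv_ascIn_iff] at hS1 hS2
  rw [pv_A_eq list1 list2 list3 h1 h2, pv_B_eq list1 list2 list3 h1 h2]
  have hl1 : (pvPosList list3 list1).length = list1.length := by simp [pvPosList]
  rw [pv_rangeAll_eq (pvPosList list3 list1) list2.length (by omega)]
  simp only [Bool.not_eq_true] at hS1 hS2
  simp [hT, hS1, hS2]
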